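-- pv_equiv track=rewrite | github.com/Yukun-Guo/ModelGardener | augmentation_group.py | _infer_parameter_type
-- ===== SOURCE A (Python) =====
-- def _infer_parameter_type(param_name):
--     """Infer the type of a parameter based on its name."""
--     param_name_lower = param_name.lower()
--
--     if any(word in param_name_lower for word in ['range', 'factor', 'rate', 'alpha', 'scale', 'intensity']):
--         return 'float'
--     elif any(word in param_name_lower for word in ['size', 'width', 'height', 'num', 'count']):
--         return 'int'
--     elif any(word in param_name_lower for word in ['flip', 'enable', 'use', 'apply']):
--         return 'bool'
--     elif any(word in param_name_lower for word in ['method', 'mode', 'interpolation']):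
--         return 'str'
--     else:
--         return 'float'  # Default to float for augmentation parameters
-- ===== SOURCE B (Python) =====
-- _KEYWORDS = (
--     ('range', 'float'), ('factor', 'float'), ('rate', 'float'),
--     ('alpha', 'float'), ('scale', 'float'), ('intensity', 'float'),
--     ('size', 'int'), ('width', 'int'), ('height', 'int'),
--     ('num', 'int'), ('count', 'int'),
--     ('flip', 'bool'), ('enable', 'bool'), ('use', 'bool'), ('apply', 'bool'),
--     ('method', 'str'), ('mode', 'str'), ('interpolation', 'str'),
-- )
-- _PRIORITY = ('float', 'int', 'bool', 'str')
--
--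
-- def _infer_parameter_type(param_name):
--     """Infer the type of a parameter based on its name."""
--     name = param_name.lower()
--     # single scan over the string: at each position collect the types of all
--     # keywords that start there, then decode the set by priority
--     found = set()
--     for i in range(len(name)):
--         for kw, t in _KEYWORDS:
--             if name.startswith(kw, i):
--                 found.add(t)
--     for t in _PRIORITY:
--         if t in found:
--             return t
--     return 'float'
-- ===== Notes on version B (the rewrite author's own statement) =====
-- stated objective: alternative
-- what changed: Instead of A's per-group substring scans with early return, B makes a single position-driven pass over the string, prefix-matching every keyword at each position to collect the SET of matched type names, and then decodes that set by priority order; it trades early exit for one uniform scan plus a decode step.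
import Mathlib
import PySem

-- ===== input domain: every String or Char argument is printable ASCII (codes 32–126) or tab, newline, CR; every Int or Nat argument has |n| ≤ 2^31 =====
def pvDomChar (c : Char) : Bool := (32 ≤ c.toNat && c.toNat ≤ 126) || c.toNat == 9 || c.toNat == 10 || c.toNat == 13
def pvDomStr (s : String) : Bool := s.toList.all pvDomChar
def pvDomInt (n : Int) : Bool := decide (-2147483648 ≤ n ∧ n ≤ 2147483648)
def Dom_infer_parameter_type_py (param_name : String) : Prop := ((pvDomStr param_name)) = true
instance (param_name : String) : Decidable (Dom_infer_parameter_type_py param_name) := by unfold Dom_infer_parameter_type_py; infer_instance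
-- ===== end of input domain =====

-- B replaces A's per-group any(substring) chain by a single position-driven scan that
-- prefix-matches every keyword at each index, collects the set of matched type names,
-- and decodes it by priority (objective: alternative).


-- ===== PORT A =====
def infer_parameter_type_py (param_name : String) : String :=
  let param_name_lower := PySem.Str.lower param_name
  if ["range", "factor", "rate", "alpha", "scale", "intensity"].any
      (fun word => PySem.Str.isIn word param_name_lower) then "float"
  else if ["size", "width", "height", "num", "count"].any
      (fun word => PySem.Str.isIn word param_name_lower) then "int"
  else if ["flip", "enable", "use", "apply"].any
      (fun word => PySem.Str.isIn word param_name_lower) then "bool"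
  else if ["method", "mode", "interpolation"].any
      (fun word => PySem.Str.isIn word param_name_lower) then "str"
  else "float"

-- ===== PORT B =====
def pvKeywords : List (List Char × String) :=
  [("range".toList, "float"), ("factor".toList, "float"), ("rate".toList, "float"),
   ("alpha".toList, "float"), ("scale".toList, "float"), ("intensity".toList, "float"),
   ("size".toList, "int"), ("width".toList, "int"), ("height".toList, "int"),
   ("num".toList, "int"), ("count".toList, "int"),
   ("flip".toList, "bool"), ("enable".toList, "bool"), ("use".toList, "bool"),
   ("apply".toList, "bool"),
   ("method".toList, "str"), ("mode".toList, "str"), ("interpolation".toList, "str")]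

def pvPriority : List String := ["float", "int", "bool", "str"]

-- name.startswith(kw, i) with 0 ≤ i is exactly PySem.Chars.startswith on (name.drop i)
-- found: the set of type names whose keyword starts at some position of name
def pvFound (name : List Char) : PySem.Set String :=
  (List.range name.length).foldl (fun s i =>
    pvKeywords.foldl (fun s kv =>
      if PySem.Chars.startswith (name.drop i) kv.1 then PySem.Set.add s kv.2 else s) s)
    PySem.Set.empty

def infer_parameter_type_py_alt (param_name : String) : String :=
  let name : List Char := PySem.Chars.lower param_name.toList
  let found : PySem.Set String := pvFound name
  match pvPriority.find? (fun t => found.contains t) with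
  | some t => t
  | none => "float"

-- ===== PRECONDITION & SPEC =====
def Spec_infer_parameter_type_py (param_name : String) (out : String) : Prop := out = infer_parameter_type_py_alt param_name
instance (param_name : String) (out : String) : Decidable (Spec_infer_parameter_type_py param_name out) := by unfold Spec_infer_parameter_type_py; infer_instance

-- ===== CLAIM (what is proved, stated in full; the proofs are below) =====
def Claim_equal_infer_parameter_type_py : Prop := ∀ (param_name : String), Dom_infer_parameter_type_py param_name → Spec_infer_parameter_type_py param_name (infer_parameter_type_py param_name)

-- ===== LEMMAS AND PROOFS =====

-- membership in a fold whose step only ever adds elements characterized by P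
theorem mem_foldl_of_step {α β : Type} (xs : List α) (F : PySem.Set β → α → PySem.Set β)
    (P : α → β → Prop) (h : ∀ s x y, y ∈ F s x ↔ y ∈ s ∨ P x y) (s : PySem.Set β) (y : β) :
    y ∈ xs.foldl F s ↔ y ∈ s ∨ ∃ x ∈ xs, P x y := by
  induction xs generalizing s with
  | nil => simp
  | cons x xs ih =>
    simp only [List.foldl_cons, ih, h, List.mem_cons]
    constructor
    · rintro (( hs | hp) | ⟨z, hz, hpz⟩)
      · exact Or.inl hs
      · exact Or.inr ⟨x, Or.inl rfl, hp⟩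
      · exact Or.inr ⟨z, Or.inr hz, hpz⟩
    · rintro (hs | ⟨z, (rfl | hz), hpz⟩)
      · exact Or.inl (Or.inl hs)
      · exact Or.inl (Or.inr hpz)
      · exact Or.inr ⟨z, hz, hpz⟩

-- membership in B's inner per-position fold over the keyword table
theorem mem_inner (name : List Char) (i : Nat) (s : PySem.Set String) (y : String) :
    y ∈ pvKeywords.foldl (fun s kv =>
        if PySem.Chars.startswith (name.drop i) kv.1 then PySem.Set.add s kv.2 else s) s ↔
      y ∈ s ∨ ∃ kv ∈ pvKeywords, PySem.Chars.startswith (name.drop i) kv.1 = true ∧ kv.2 = y := by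
  refine mem_foldl_of_step pvKeywords _
    (fun kv y => PySem.Chars.startswith (name.drop i) kv.1 = true ∧ kv.2 = y) ?_ s y
  intro s kv y
  by_cases h : PySem.Chars.startswith (name.drop i) kv.1 = true
  · simp [h, PySem.Set.mem_add, eq_comm]
  · simp [h]

-- membership in B's accumulated set of matched type names
theorem mem_found (name : List Char) (y : String) :
    y ∈ pvFound name ↔
      ∃ kv ∈ pvKeywords, kv.2 = y ∧
        (∃ i ∈ List.range name.length, PySem.Chars.startswith (name.drop i) kv.1 = true) := by
  unfold pvFound
  rw [mem_foldl_of_step (List.range name.length) _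
    (fun i y => ∃ kv ∈ pvKeywords, PySem.Chars.startswith (name.drop i) kv.1 = true ∧ kv.2 = y)
    (fun s i y => mem_inner name i s y) PySem.Set.empty y]
  simp only [PySem.Set.empty, List.not_mem_nil, false_or]
  constructor
  · rintro ⟨i, hi, kv, hkv, hst, hy⟩; exact ⟨kv, hkv, hy, i, hi, hst⟩
  · rintro ⟨kv, hkv, hy, i, hi, hst⟩; exact ⟨i, hi, kv, hkv, hst, hy⟩

-- a nonempty keyword starts at some position of the string iff it is a substring
theorem exists_range_startswith (s kw : List Char) (hkw : kw ≠ []) :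
    (∃ i ∈ List.range s.length, PySem.Chars.startswith (s.drop i) kw = true) ↔
      PySem.Chars.isIn kw s = true := by
  rw [← PySem.Chars.exists_prefix_drop_iff_isIn]
  constructor
  · rintro ⟨i, _, h⟩
    exact ⟨i, (PySem.Chars.startswith_iff _ _).1 h⟩
  · rintro ⟨j, h⟩
    by_cases hj : j < s.length
    · exact ⟨j, List.mem_range.2 hj, (PySem.Chars.startswith_iff _ _).2 h⟩
    · exfalso
      rw [List.drop_eq_nil_of_le (by omega)] at h
      exact hkw (List.prefix_nil.1 h)

-- B's set contains a type name iff some keyword of that type is a substring of name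
theorem contains_found (name : List Char) (y : String) :
    PySem.Set.contains (pvFound name) y = true ↔
      ∃ kv ∈ pvKeywords, kv.2 = y ∧ PySem.Chars.isIn kv.1 name = true := by
  have hne : ∀ kv ∈ pvKeywords, kv.1 ≠ ([] : List Char) := by decide
  rw [show (PySem.Set.contains (pvFound name) y = true) ↔ y ∈ pvFound name from by
    simp [PySem.Set.contains]]
  rw [mem_found]
  constructor
  · rintro ⟨kv, h1, h2, h3⟩
    exact ⟨kv, h1, h2, (exists_range_startswith name kv.1 (hne kv h1)).1 h3⟩
  · rintro ⟨kv, h1, h2, h3⟩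
    exact ⟨kv, h1, h2, (exists_range_startswith name kv.1 (hne kv h1)).2 h3⟩

-- each of A's group tests equals a contains-test on B's set
theorem group_float (p : String) :
    (["range", "factor", "rate", "alpha", "scale", "intensity"].any
      (fun word => PySem.Str.isIn word (PySem.Str.lower p))) =
    PySem.Set.contains (pvFound (PySem.Chars.lower p.toList)) "float" := by
  rw [Bool.eq_iff_iff, contains_found]
  simp [pvKeywords]

theorem group_int (p : String) :
    (["size", "width", "height", "num", "count"].any
      (fun word => PySem.Str.isIn word (PySem.Str.lower p))) =
    PySem.Set.contains (pvFound (PySem.Chars.lower p.toList)) "int" := by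
  rw [Bool.eq_iff_iff, contains_found]
  simp [pvKeywords]

theorem group_bool (p : String) :
    (["flip", "enable", "use", "apply"].any
      (fun word => PySem.Str.isIn word (PySem.Str.lower p))) =
    PySem.Set.contains (pvFound (PySem.Chars.lower p.toList)) "bool" := by
  rw [Bool.eq_iff_iff, contains_found]
  simp [pvKeywords]

theorem group_str (p : String) :
    (["method", "mode", "interpolation"].any
      (fun word => PySem.Str.isIn word (PySem.Str.lower p))) =
    PySem.Set.contains (pvFound (PySem.Chars.lower p.toList)) "str" := by
  rw [Bool.eq_iff_iff, contains_found]
  simp [pvKeywords]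

-- ===== VERDICT (by name: the statement is the Claim_ definition above) =====
theorem infer_parameter_type_py_spec : Claim_equal_infer_parameter_type_py := by
  intro p _
  unfold Spec_infer_parameter_type_py infer_parameter_type_py infer_parameter_type_py_alt
  show (if _ then _ else _) = _
  rw [group_float, group_int, group_bool, group_str]
  cases h0 : PySem.Set.contains (pvFound (PySem.Chars.lower p.toList)) "float" <;>
  cases h1 : PySem.Set.contains (pvFound (PySem.Chars.lower p.toList)) "int" <;>
  cases h2 : PySem.Set.contains (pvFound (PySem.Chars.lower p.toList)) "bool" <;>
  cases h3 : PySem.Set.contains (pvFound (PySem.Chars.lower p.toList)) "str" <;>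
    (simp [PySem.Set.contains] at h0 h1 h2 h3;
     simp [pvPriority, List.find?, h0, h1, h2, h3])
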